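-- pv_equiv track=rewrite | github.com/oliver2214/Yandex-algorithms-v1 | class_6/I.py | lbinsearch
-- ===== SOURCE A (Python) =====
-- def check(m, params):
--     n, r, c, heights = params
--     groups_count = 0
--
--     i = 0
--     while i <= len(heights) - c and groups_count < r:
--         rez = heights[i:i + c]
--         if rez[-1] - rez[0] <= m:
--             groups_count += 1
--             i += c
--         else:
--             i += 1
--
--     if groups_count >= r or i == 0:
--         return True
--     return False
--
-- def lbinsearch(params):
--     l, right = 0, params[3][-1] - params[3][0]
--     while l < right:
--         m = (l + right) // 2
--         if check(m, params):
--             right = m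
--         else:
--             l = m + 1
--     return l
-- ===== SOURCE B (Python) =====
-- def _groups(heights, c, m):
--     # uncapped greedy count of disjoint windows of c consecutive heights with range <= m
--     g = 0
--     i = 0
--     n = len(heights)
--     while i + c <= n:
--         if heights[i + c - 1] - heights[i] <= m:
--             g += 1
--             i += c
--         else:
--             i += 1
--     return g
--
--
-- def _ok(m, r, c, heights):
--     return r <= 0 or c > len(heights) or _groups(heights, c, m) >= r
--
--
-- def lbinsearch(params):
--     r, c, heights = params[1], params[2], params[3]
--     right = heights[-1] - heights[0]
--     if right <= 0 or _ok(0, r, c, heights):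
--         return 0
--     cands = sorted({heights[i + c - 1] - heights[i] for i in range(len(heights) - c + 1)})
--     for v in cands:
--         if 0 < v < right and _ok(v, r, c, heights):
--             return v
--     return right
-- ===== Notes on version B (the rewrite author's own statement) =====
-- stated objective: alternative
-- what changed: Replaces the value-interval bisection over [0, H] by a precomputed table of the achievable window ranges: B builds the sorted distinct list of heights[i+c-1]-heights[i], and returns the smallest candidate that the (restructured, uncapped-count) greedy feasibility test accepts, 0 if threshold 0 already works, or H if none works.
-- outside the precondition, e.g. on lbinsearch((2, 1, -1, [1, 2])): A returns 0, B raises IndexError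
import Mathlib
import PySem

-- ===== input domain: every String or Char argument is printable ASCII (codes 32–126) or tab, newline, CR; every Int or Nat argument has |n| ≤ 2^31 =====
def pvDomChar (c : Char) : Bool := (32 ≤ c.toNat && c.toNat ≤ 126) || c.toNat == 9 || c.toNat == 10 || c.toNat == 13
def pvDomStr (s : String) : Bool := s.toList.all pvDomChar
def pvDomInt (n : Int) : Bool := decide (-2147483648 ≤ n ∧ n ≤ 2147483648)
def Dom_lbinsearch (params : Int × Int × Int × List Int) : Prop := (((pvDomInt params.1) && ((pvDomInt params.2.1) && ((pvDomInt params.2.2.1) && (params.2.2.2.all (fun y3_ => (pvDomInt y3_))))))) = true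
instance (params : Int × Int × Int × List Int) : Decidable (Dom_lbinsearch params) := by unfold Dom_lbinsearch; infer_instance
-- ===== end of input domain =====

-- B replaces A's binary search on the value interval [0, H] by a linear scan of the sorted
-- distinct achievable window ranges (equal cost class, different algorithm; not claimed faster).

-- ===== PORT A =====

-- the inner while-loop of A's `check`; fuel only makes the recursion structural
-- (heights.length + 1 iterations suffice whenever c ≥ 1, i.e. inside Pre_)
def checkLoopA (heights : List Int) (r c m : Int) : Nat → Int → Int → Int × Int
  | 0, i, g => (i, g)
  | fuel+1, i, g =>
    if i ≤ (heights.length : Int) - c ∧ g < r then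
      let rez := PySem.List.slice heights (some i) (some (i + c))
      match PySem.List.pyGet? rez (-1), PySem.List.pyGet? rez 0 with
      | some a, some b =>
        if a - b ≤ m then checkLoopA heights r c m fuel (i + c) (g + 1)
        else checkLoopA heights r c m fuel (i + 1) g
      | _, _ => (i, g)   -- Python raises IndexError on the empty slice; unreachable inside Pre_
    else (i, g)

def checkA (m : Int) (params : Int × Int × Int × List Int) : Bool :=
  let r := params.2.1
  let heights := params.2.2.2
  let res := checkLoopA heights r params.2.2.1 m (heights.length + 1) 0 0
  if res.2 ≥ r ∨ res.1 = 0 then true else false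

-- midpoint bounds, cited by bsA's termination proof
theorem pvMidLt (l r : Int) (h : l < r) : PySem.Int.floordiv (l + r) 2 < r := by
  rw [PySem.Int.floordiv_lt_iff_lt_mul (by omega)]; omega

theorem pvMidGe (l r : Int) (h : l < r) : l ≤ PySem.Int.floordiv (l + r) 2 := by
  rw [PySem.Int.le_floordiv_iff_mul_le (by omega)]; omega

-- A's binary-search while-loop
def bsA (params : Int × Int × Int × List Int) (l right : Int) : Int :=
  if h : l < right then
    let m := PySem.Int.floordiv (l + right) 2
    if checkA m params then bsA params l m else bsA params (m + 1) right
  else l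
termination_by (right - l).toNat
decreasing_by
  · have h1 := pvMidLt l right h
    have h2 := pvMidGe l right h
    omega
  · have h1 := pvMidLt l right h
    have h2 := pvMidGe l right h
    omega

def lbinsearch (params : Int × Int × Int × List Int) : Int :=
  match PySem.List.pyGet? params.2.2.2 (-1), PySem.List.pyGet? params.2.2.2 0 with
  | some a, some b => bsA params 0 (a - b)
  | _, _ => 0   -- Python raises IndexError on empty heights; excluded by Pre_

-- ===== PORT B =====

-- Source B's `_groups` while-loop (uncapped greedy group count); fuel makes it structural
def groupsLoopB (heights : List Int) (c m : Int) : Nat → Int → Int → Int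
  | 0, _, g => g
  | fuel+1, i, g =>
    if i + c ≤ (heights.length : Int) then
      match PySem.List.pyGet? heights (i + c - 1), PySem.List.pyGet? heights i with
      | some a, some b =>
        if a - b ≤ m then groupsLoopB heights c m fuel (i + c) (g + 1)
        else groupsLoopB heights c m fuel (i + 1) g
      | _, _ => g   -- Python raises IndexError; unreachable inside Pre_
    else g

def okB (m r c : Int) (heights : List Int) : Bool :=
  if r ≤ 0 then true
  else if c > (heights.length : Int) then true
  else groupsLoopB heights c m (heights.length + 1) 0 0 ≥ r

-- sorted({heights[i+c-1] - heights[i] for i in range(len(heights)-c+1)})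
-- (indexing is in range whenever this is reached inside Pre_, so .getD 0 is exact there)
def candsB (c : Int) (heights : List Int) : List Int :=
  PySem.List.sorted
    (PySem.Set.ofList ((PySem.List.pyRange 0 ((heights.length : Int) - c + 1) 1).map
      (fun i => ((PySem.List.pyGet? heights (i + c - 1)).getD 0)
                - ((PySem.List.pyGet? heights i).getD 0))))
    (fun x => x) false

-- the `for v in cands: …` loop with its early return
def scanB (right r c : Int) (heights : List Int) : List Int → Int
  | [] => right
  | v :: vs =>
    if 0 < v ∧ v < right ∧ okB v r c heights = true then v
    else scanB right r c heights vs

def lbinsearch_alt (params : Int × Int × Int × List Int) : Int :=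
  let r := params.2.1
  let c := params.2.2.1
  let heights := params.2.2.2
  match PySem.List.pyGet? heights (-1), PySem.List.pyGet? heights 0 with
  | some a, some b =>
    let right := a - b
    if right ≤ 0 then 0
    else if okB 0 r c heights then 0
    else scanB right r c heights (candsB c heights)
  | _, _ => 0

-- ===== PRECONDITION & SPEC =====

-- Pre_ excludes empty heights (A raises IndexError) and non-positive window size c together
-- with r ≥ 1 and a positive total range, where A's slicing raises IndexError or its loop never
-- terminates on almost all inputs and any returned value is an accident of negative-index wraparound.
def Pre_lbinsearch (params : Int × Int × Int × List Int) : Prop :=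
  params.2.2.2 ≠ [] ∧
    (1 ≤ params.2.2.1 ∨ params.2.1 ≤ 0 ∨ params.2.2.2.getLastD 0 ≤ params.2.2.2.headD 0)

instance (params : Int × Int × Int × List Int) : Decidable (Pre_lbinsearch params) := by
  unfold Pre_lbinsearch; infer_instance

def pvWitness_lbinsearch : (Int × Int × Int × List Int) := (5, 2, 2, [1, 2, 3, 5, 9])

def Spec_lbinsearch (params : Int × Int × Int × List Int) (out : Int) : Prop := out = lbinsearch_alt params
instance (params : Int × Int × Int × List Int) (out : Int) : Decidable (Spec_lbinsearch params out) := by unfold Spec_lbinsearch; infer_instance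

-- ===== CLAIM (what is proved, stated in full; the proofs are below) =====
def Claim_equal_lbinsearch : Prop := ∀ (params : Int × Int × Int × List Int), Dom_lbinsearch params → Pre_lbinsearch params → Spec_lbinsearch params (lbinsearch params)

-- ===== LEMMAS AND PROOFS =====

-- the range of the window starting at index i (both programs compare it with the threshold)
def dwin (h : List Int) (c i : Int) : Int :=
  h.getD (i + c - 1).toNat 0 - h.getD i.toNat 0

-- the mathematical uncapped greedy group count both loops compute
def gcnt (h : List Int) (c m i : Int) : Int :=
  if H : 1 ≤ c ∧ 0 ≤ i ∧ i + c ≤ (h.length : Int) then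
    if dwin h c i ≤ m then gcnt h c m (i + c) + 1 else gcnt h c m (i + 1)
  else 0
termination_by ((h.length : Int) - i).toNat
decreasing_by
  · obtain ⟨h1, h2, h3⟩ := H; omega
  · obtain ⟨h1, h2, h3⟩ := H; omega

theorem gcnt_nonneg (h : List Int) (c m : Int) : ∀ i : Int, 0 ≤ gcnt h c m i := by
  suffices H : ∀ k : Nat, ∀ i : Int, ((h.length : Int) - i).toNat ≤ k → 0 ≤ gcnt h c m i by
    intro i; exact H (((h.length : Int) - i).toNat) i le_rfl
  intro k
  induction k with
  | zero =>
    intro i hk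
    rw [gcnt, dif_neg (by omega)]
  | succ k ih =>
    intro i hk
    rw [gcnt]
    split
    · rename_i hg
      split
      · have := ih (i + c) (by omega); omega
      · have := ih (i + 1) (by omega); omega
    · omega

theorem gcnt_zero_of_high (h : List Int) (c m i : Int) (hi : (h.length : Int) ≤ i + c - 1 ∨ ¬ 1 ≤ c ∨ ¬ 0 ≤ i) :
    gcnt h c m i = 0 := by
  rw [gcnt, dif_neg (by omega)]

-- step lemmas: gcnt loses at most one group when the start advances by up to c,
-- and never gains when the start advances by one
theorem gcnt_step (h : List Int) (c m : Int) : ∀ k : Nat, ∀ i : Int, 0 ≤ i →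
    (((h.length : Int) - i).toNat ≤ k) →
    (∀ t : Int, 0 ≤ t → t ≤ c → gcnt h c m i ≤ gcnt h c m (i + t) + 1) ∧
      gcnt h c m (i + 1) ≤ gcnt h c m i := by
  intro k
  induction k with
  | zero =>
    intro i hi hk
    have hz : gcnt h c m i = 0 := gcnt_zero_of_high h c m i (by omega)
    have hz1 : gcnt h c m (i + 1) = 0 := gcnt_zero_of_high h c m (i + 1) (by omega)
    refine ⟨fun t ht0 htc => ?_, by omega⟩
    have := gcnt_nonneg h c m (i + t); omega
  | succ k ih =>
    intro i hi hk
    by_cases hLi : (h.length : Int) ≤ i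
    · have hz : gcnt h c m i = 0 := gcnt_zero_of_high h c m i (by omega)
      have hz1 : gcnt h c m (i + 1) = 0 := gcnt_zero_of_high h c m (i + 1) (by omega)
      refine ⟨fun t ht0 htc => ?_, by omega⟩
      have := gcnt_nonneg h c m (i + t); omega
    · constructor
      · -- advancing the start by t ≤ c loses at most one group
        intro t ht0 htc
        by_cases ht : t = 0
        · subst ht; simp only [add_zero]; omega
        · rw [gcnt]
          split
          · rename_i hg
            split
            · rename_i hd
              -- gcnt is antitone on starts ≥ i + 1 (by the induction hypothesis)
              have anti : ∀ d : Nat, ∀ a : Int, i + 1 ≤ a →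
                  gcnt h c m (a + d) ≤ gcnt h c m a := by
                intro d
                induction d with
                | zero => intro a ha; simp
                | succ d ihd =>
                  intro a ha
                  have h1 : gcnt h c m (a + d + 1) ≤ gcnt h c m (a + d) := by
                    by_cases hLa : (h.length : Int) ≤ a + (d : Int)
                    · have hz1 : gcnt h c m (a + d + 1) = 0 :=
                        gcnt_zero_of_high h c m (a + d + 1) (by omega)
                      have := gcnt_nonneg h c m (a + (d : Int)); omega
                    · exact (ih (a + d) (by omega) (by omega)).2
                  have heq : a + ((d : Int) + 1) = a + d + 1 := by ring
                  calc gcnt h c m (a + ((d : Nat) + 1 : Nat))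
                      = gcnt h c m (a + d + 1) := by push_cast; rw [heq]
                    _ ≤ gcnt h c m (a + d) := h1
                    _ ≤ gcnt h c m a := ihd a ha
              have hct : i + c = (i + t) + (((c - t).toNat : Int)) := by omega
              have := anti (c - t).toNat (i + t) (by omega)
              rw [← hct] at this
              omega
            · -- the window at i fails: step to i + 1 and use t - 1
              have h1 := (ih (i + 1) (by omega) (by omega)).1 (t - 1) (by omega) (by omega)
              have heq : i + 1 + (t - 1) = i + t := by ring
              rw [heq] at h1; exact h1
          · -- no window at i at all
            have := gcnt_nonneg h c m (i + t); omega
      · -- advancing the start by one never gains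
        conv_rhs => rw [gcnt]
        split
        · rename_i hg
          split
          · rename_i hd
            have h1 := (ih (i + 1) (by omega) (by omega)).1 (c - 1) (by omega) (by omega)
            have heq : i + 1 + (c - 1) = i + c := by ring
            rw [heq] at h1; exact h1
          · exact le_rfl
        · rename_i hg
          rw [gcnt_zero_of_high h c m (i + 1) (by omega)]

theorem gcnt_le_shift (h : List Int) (c m : Int) (i t : Int) (hi : 0 ≤ i) (ht0 : 0 ≤ t) (htc : t ≤ c) :
    gcnt h c m i ≤ gcnt h c m (i + t) + 1 :=
  (gcnt_step h c m (((h.length : Int) - i).toNat) i hi le_rfl).1 t ht0 htc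

theorem gcnt_mono (h : List Int) (c m m' : Int) (hmm : m ≤ m') : ∀ k : Nat, ∀ i : Int, 0 ≤ i →
    (((h.length : Int) - i).toNat ≤ k) → gcnt h c m i ≤ gcnt h c m' i := by
  intro k
  induction k with
  | zero =>
    intro i hi hk
    rw [gcnt_zero_of_high h c m i (by omega)]
    exact gcnt_nonneg h c m' i
  | succ k ih =>
    intro i hi hk
    by_cases hg : 1 ≤ c ∧ 0 ≤ i ∧ i + c ≤ (h.length : Int)
    · rw [gcnt, dif_pos hg]
      by_cases hd : dwin h c i ≤ m
      · rw [if_pos hd]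
        conv_rhs => rw [gcnt, dif_pos hg, if_pos (hd.trans hmm)]
        have := ih (i + c) (by omega) (by omega); omega
      · rw [if_neg hd]
        conv_rhs => rw [gcnt, dif_pos hg]
        by_cases hd' : dwin h c i ≤ m'
        · rw [if_pos hd']
          have h1 := ih (i + 1) (by omega) (by omega)
          have h2 := gcnt_le_shift h c m' (i + 1) (c - 1) (by omega) (by omega) (by omega)
          have heq : i + 1 + (c - 1) = i + c := by ring
          rw [heq] at h2; omega
        · rw [if_neg hd']
          exact ih (i + 1) (by omega) (by omega)
    · rw [gcnt, dif_neg hg]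
      exact gcnt_nonneg h c m' i

theorem gcnt_congr (h : List Int) (c m m' : Int)
    (hiff : ∀ j : Int, 0 ≤ j → j + c ≤ (h.length : Int) → (dwin h c j ≤ m ↔ dwin h c j ≤ m')) :
    ∀ k : Nat, ∀ i : Int, 0 ≤ i → (((h.length : Int) - i).toNat ≤ k) →
    gcnt h c m i = gcnt h c m' i := by
  intro k
  induction k with
  | zero =>
    intro i hi hk
    rw [gcnt_zero_of_high h c m i (by omega), gcnt_zero_of_high h c m' i (by omega)]
  | succ k ih =>
    intro i hi hk
    by_cases hg : 1 ≤ c ∧ 0 ≤ i ∧ i + c ≤ (h.length : Int)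
    · rw [gcnt, dif_pos hg]
      conv_rhs => rw [gcnt, dif_pos hg]
      have hdj := hiff i hi hg.2.2
      by_cases hd : dwin h c i ≤ m
      · rw [if_pos hd, if_pos (hdj.mp hd), ih (i + c) (by omega) (by omega)]
      · rw [if_neg hd, if_neg (fun hx => hd (hdj.mpr hx)), ih (i + 1) (by omega) (by omega)]
    · rw [gcnt, dif_neg hg]
      conv_rhs => rw [gcnt, dif_neg hg]

theorem pyGet?_getD (h : List Int) (j : Int) (h0 : 0 ≤ j) (hlt : j < (h.length : Int)) :
    PySem.List.pyGet? h j = some (h.getD j.toNat 0) := by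
  rw [PySem.List.pyGet?_eq_some_getElem h h0 hlt, List.getD_eq_getElem h 0 (by omega)]

theorem sliceA_last (h : List Int) (c i : Int) (hc : 1 ≤ c) (h0 : 0 ≤ i)
    (h2 : i + c ≤ (h.length : Int)) :
    PySem.List.pyGet? (PySem.List.slice h (some i) (some (i + c))) (-1)
      = some (h.getD (i + c - 1).toNat 0) := by
  rw [PySem.List.slice_of_nonneg h h0 (by omega) (by omega) h2, PySem.List.pyGet?_neg_one,
    List.getLast?_eq_getElem?, List.getElem?_take, List.getElem?_drop]
  rw [if_pos (by simp [List.length_take, List.length_drop]; omega)]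
  rw [List.getElem?_eq_getElem (l := h) (by simp [List.length_take, List.length_drop]; omega)]
  congr 1
  rw [List.getD_eq_getElem h 0 (by omega)]
  congr 1
  simp [List.length_take, List.length_drop]
  omega

theorem sliceA_head (h : List Int) (c i : Int) (hc : 1 ≤ c) (h0 : 0 ≤ i)
    (h2 : i + c ≤ (h.length : Int)) :
    PySem.List.pyGet? (PySem.List.slice h (some i) (some (i + c))) 0
      = some (h.getD i.toNat 0) := by
  rw [PySem.List.slice_of_nonneg h h0 (by omega) (by omega) h2, PySem.List.pyGet?_zero,
    List.getElem?_take, List.getElem?_drop, if_pos (by omega)]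
  rw [List.getElem?_eq_getElem (l := h) (by omega)]
  rw [List.getD_eq_getElem h 0 (by omega)]
  simp

theorem loopA_char (h : List Int) (r c m : Int) (hc : 1 ≤ c) :
    ∀ fuel : Nat, ∀ i g : Int, 0 ≤ i → 0 ≤ g → g ≤ r →
    (((h.length : Int) - i).toNat + 1 ≤ fuel) →
    (checkLoopA h r c m fuel i g).2 = min r (g + gcnt h c m i) ∧
      i ≤ (checkLoopA h r c m fuel i g).1 ∧
      ((i ≤ (h.length : Int) - c ∧ g < r) → 1 ≤ (checkLoopA h r c m fuel i g).1) := by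
  intro fuel
  induction fuel with
  | zero => intro i g hi hg hgr hk; omega
  | succ f ihf =>
    intro i g hi hg hgr hk
    by_cases hcond : (i ≤ (h.length : Int) - c ∧ g < r)
    · have heq : checkLoopA h r c m (f + 1) i g =
          if dwin h c i ≤ m then checkLoopA h r c m f (i + c) (g + 1)
          else checkLoopA h r c m f (i + 1) g := by
        simp only [checkLoopA, if_pos hcond,
          sliceA_last h c i hc hi (by omega), sliceA_head h c i hc hi (by omega), dwin]
        rfl
      rw [heq]
      by_cases hd : dwin h c i ≤ m
      · rw [if_pos hd]
        have hgc : gcnt h c m i = gcnt h c m (i + c) + 1 := by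
          rw [gcnt, dif_pos ⟨hc, hi, by omega⟩, if_pos hd]
        obtain ⟨e1, e2, e3⟩ := ihf (i + c) (g + 1) (by omega) (by omega) (by omega) (by omega)
        exact ⟨by omega, by omega, fun _ => by omega⟩
      · rw [if_neg hd]
        have hgc : gcnt h c m i = gcnt h c m (i + 1) := by
          rw [gcnt, dif_pos ⟨hc, hi, by omega⟩, if_neg hd]
        obtain ⟨e1, e2, e3⟩ := ihf (i + 1) g (by omega) (by omega) (by omega) (by omega)
        exact ⟨by omega, by omega, fun _ => by omega⟩
    · have heq : checkLoopA h r c m (f + 1) i g = (i, g) := by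
        simp only [checkLoopA, if_neg hcond]
      rw [heq]
      refine ⟨?_, le_rfl, fun hx => absurd hx hcond⟩
      rcases not_and_or.mp hcond with hci | hgr'
      · have hz : gcnt h c m i = 0 := gcnt_zero_of_high h c m i (by omega)
        simp only [hz]
        omega
      · have := gcnt_nonneg h c m i
        omega

theorem checkA_true_iff (m : Int) (p : Int × Int × Int × List Int) (hc : 1 ≤ p.2.2.1) :
    (checkA m p = true) ↔
      (p.2.1 ≤ 0 ∨ (p.2.2.2.length : Int) < p.2.2.1 ∨ p.2.1 ≤ gcnt p.2.2.2 p.2.2.1 m 0) := by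
  obtain ⟨n, r, c, h⟩ := p
  by_cases hr : r ≤ 0
  · have heq : checkLoopA h r c m (h.length + 1) 0 0 = (0, 0) := by
      simp only [checkLoopA, if_neg (by omega : ¬ ((0:Int) ≤ (h.length : Int) - c ∧ (0:Int) < r))]
    simp only [checkA, heq]
    simp [hr]
  · by_cases hcL : (h.length : Int) < c
    · have heq : checkLoopA h r c m (h.length + 1) 0 0 = (0, 0) := by
        simp only [checkLoopA, if_neg (by omega : ¬ ((0:Int) ≤ (h.length : Int) - c ∧ (0:Int) < r))]
      simp only [checkA, heq]
      simp [hcL]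
    · obtain ⟨e1, e2, e3⟩ := loopA_char h r c m hc (h.length + 1) 0 0 le_rfl le_rfl
        (by omega) (by omega)
      have h3 : 1 ≤ (checkLoopA h r c m (h.length + 1) 0 0).1 := e3 ⟨by omega, by omega⟩
      simp only [checkA]
      constructor
      · intro hlhs
        by_cases hq : (checkLoopA h r c m (h.length + 1) 0 0).2 ≥ r ∨
            (checkLoopA h r c m (h.length + 1) 0 0).1 = 0
        · have hgn := gcnt_nonneg h c m 0
          right; right; omega
        · rw [if_neg hq] at hlhs; exact absurd hlhs (by simp)
      · intro hrhs
        have hq : r ≤ gcnt h c m 0 := by omega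
        rw [if_pos (by left; omega)]

theorem loopB_char (h : List Int) (c m : Int) (hc : 1 ≤ c) :
    ∀ fuel : Nat, ∀ i g : Int, 0 ≤ i → (((h.length : Int) - i).toNat + 1 ≤ fuel) →
    groupsLoopB h c m fuel i g = g + gcnt h c m i := by
  intro fuel
  induction fuel with
  | zero => intro i g hi hk; omega
  | succ f ihf =>
    intro i g hi hk
    by_cases hcond : i + c ≤ (h.length : Int)
    · have heq : groupsLoopB h c m (f + 1) i g =
          if dwin h c i ≤ m then groupsLoopB h c m f (i + c) (g + 1)
          else groupsLoopB h c m f (i + 1) g := by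
        simp only [groupsLoopB, if_pos hcond,
          pyGet?_getD h (i + c - 1) (by omega) (by omega),
          pyGet?_getD h i (by omega) (by omega), dwin]
        rfl
      rw [heq]
      by_cases hd : dwin h c i ≤ m
      · rw [if_pos hd, ihf (i + c) (g + 1) (by omega) (by omega)]
        rw [show gcnt h c m i = gcnt h c m (i + c) + 1 from by
          rw [gcnt, dif_pos ⟨hc, hi, hcond⟩, if_pos hd]]
        ring
      · rw [if_neg hd, ihf (i + 1) g (by omega) (by omega)]
        rw [show gcnt h c m i = gcnt h c m (i + 1) from by
          rw [gcnt, dif_pos ⟨hc, hi, hcond⟩, if_neg hd]]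
    · have heq : groupsLoopB h c m (f + 1) i g = g := by
        simp only [groupsLoopB, if_neg hcond]
      rw [heq, gcnt_zero_of_high h c m i (by omega)]
      ring

theorem okB_true_iff (m r c : Int) (h : List Int) (hc : 1 ≤ c) :
    (okB m r c h = true) ↔ (r ≤ 0 ∨ (h.length : Int) < c ∨ r ≤ gcnt h c m 0) := by
  unfold okB
  split_ifs with hr hcL
  · simp [hr]
  · simp [hcL]
  · rw [loopB_char h c m hc (h.length + 1) 0 0 le_rfl (by omega)]
    simp only [ge_iff_le, decide_eq_true_eq]
    omega

theorem bsA_base (p : Int × Int × Int × List Int) (l r : Int) (hlr : ¬ l < r) :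
    bsA p l r = l := by
  rw [bsA, dif_neg hlr]

theorem bsA_unfold (p : Int × Int × Int × List Int) (l r : Int) (hlr : l < r) :
    bsA p l r = if checkA (PySem.Int.floordiv (l + r) 2) p
      then bsA p l (PySem.Int.floordiv (l + r) 2)
      else bsA p (PySem.Int.floordiv (l + r) 2 + 1) r := by
  rw [bsA, dif_pos hlr]

theorem bsA_char (p : Int × Int × Int × List Int)
    (hmono : ∀ x y : Int, x ≤ y → checkA x p = true → checkA y p = true) :
    ∀ k : Nat, ∀ l r : Int, ((r - l).toNat ≤ k) → l ≤ r →
    l ≤ bsA p l r ∧ bsA p l r ≤ r ∧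
      (∀ x : Int, l ≤ x → x < bsA p l r → ¬ checkA x p = true) ∧
      (bsA p l r < r → checkA (bsA p l r) p = true) := by
  intro k
  induction k with
  | zero =>
    intro l r hk hlr
    rw [bsA_base p l r (by omega)]
    exact ⟨le_rfl, hlr, fun x hx1 hx2 => absurd hx2 (by omega), fun hx => absurd hx (by omega)⟩
  | succ k ih =>
    intro l r hk hlr
    by_cases hl : l < r
    · rw [bsA_unfold p l r hl]
      have hm1 := pvMidGe l r hl
      have hm2 := pvMidLt l r hl
      by_cases hch : checkA (PySem.Int.floordiv (l + r) 2) p = true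
      · rw [if_pos hch]
        obtain ⟨e1, e2, e3, e4⟩ := ih l (PySem.Int.floordiv (l + r) 2) (by omega) (by omega)
        refine ⟨e1, by omega, e3, fun hlt => ?_⟩
        rcases lt_or_eq_of_le e2 with hlt' | heq'
        · exact e4 hlt'
        · rw [heq']; exact hch
      · rw [if_neg hch]
        obtain ⟨e1, e2, e3, e4⟩ := ih (PySem.Int.floordiv (l + r) 2 + 1) r (by omega) (by omega)
        refine ⟨by omega, e2, fun x hx1 hx2 hxt => ?_, e4⟩
        by_cases hxm : x ≤ PySem.Int.floordiv (l + r) 2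
        · exact hch (hmono x _ hxm hxt)
        · exact e3 x (by omega) hx2 hxt
    · rw [bsA_base p l r hl]
      exact ⟨le_rfl, by omega, fun x hx1 hx2 => absurd hx2 (by omega), fun hx => absurd hx (by omega)⟩

theorem bsA_const_true (p : Int × Int × Int × List Int)
    (hall : ∀ x : Int, checkA x p = true) :
    ∀ k : Nat, ∀ l r : Int, ((r - l).toNat ≤ k) → bsA p l r = l := by
  intro k
  induction k with
  | zero =>
    intro l r hk
    rw [bsA_base p l r (by omega)]
  | succ k ih =>
    intro l r hk
    by_cases hl : l < r
    · rw [bsA_unfold p l r hl, if_pos (hall _)]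
      have := pvMidLt l r hl
      have := pvMidGe l r hl
      exact ih l _ (by omega)
    · rw [bsA_base p l r hl]

theorem scanB_none (right r c : Int) (h : List Int) :
    ∀ cs : List Int, (∀ v ∈ cs, ¬ (0 < v ∧ v < right ∧ okB v r c h = true)) →
    scanB right r c h cs = right := by
  intro cs
  induction cs with
  | nil => intro _; rfl
  | cons v vs ih =>
    intro hall
    rw [scanB, if_neg (hall v (by simp))]
    exact ih (fun w hw => hall w (by simp [hw]))

theorem scanB_first (right r c : Int) (h : List Int) (a : Int) :
    ∀ cs : List Int, cs.Pairwise (· < ·) → a ∈ cs →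
    (0 < a ∧ a < right ∧ okB a r c h = true) →
    (∀ w ∈ cs, w < a → ¬ (0 < w ∧ w < right ∧ okB w r c h = true)) →
    scanB right r c h cs = a := by
  intro cs
  induction cs with
  | nil => intro _ hmem; exact absurd hmem (by simp)
  | cons v vs ih =>
    intro hpw hmem hpred hfail
    rcases List.mem_cons.mp hmem with hva | hvs
    · subst hva
      rw [scanB, if_pos hpred]
    · have hvlt : v < a := (List.pairwise_cons.mp hpw).1 a hvs
      rw [scanB, if_neg (hfail v (by simp) hvlt)]
      exact ih (List.pairwise_cons.mp hpw).2 hvs hpred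
        (fun w hw hwa => hfail w (by simp [hw]) hwa)

theorem mem_candsB (c : Int) (h : List Int) (hc : 1 ≤ c) (v : Int) :
    v ∈ candsB c h ↔ ∃ i : Int, 0 ≤ i ∧ i + c ≤ (h.length : Int) ∧ v = dwin h c i := by
  unfold candsB
  rw [PySem.List.mem_sorted, PySem.Set.mem_ofList, List.mem_map]
  constructor
  · rintro ⟨x, hx, hfx⟩
    rw [PySem.List.mem_pyRange_one] at hx
    refine ⟨x, hx.1, by omega, ?_⟩
    rw [← hfx, pyGet?_getD h (x + c - 1) (by omega) (by omega),
      pyGet?_getD h x (by omega) (by omega)]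
    rfl
  · rintro ⟨i, hi0, hic, rfl⟩
    refine ⟨i, ?_, ?_⟩
    · rw [PySem.List.mem_pyRange_one]; omega
    · rw [pyGet?_getD h (i + c - 1) (by omega) (by omega),
        pyGet?_getD h i (by omega) (by omega)]
      rfl

theorem exists_max (l : List Int) (hne : l ≠ []) : ∃ v ∈ l, ∀ w ∈ l, w ≤ v := by
  induction l with
  | nil => exact absurd rfl hne
  | cons x xs ih =>
    rcases eq_or_ne xs [] with hnil | hx
    · exact ⟨x, by simp, by simp [hnil]⟩
    · obtain ⟨v, hv, hmax⟩ := ih hx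
      rcases le_total x v with hle | hle
      · exact ⟨v, by simp [hv], by
          intro w hw
          rcases List.mem_cons.mp hw with rfl | hw
          · exact hle
          · exact hmax w hw⟩
      · exact ⟨x, by simp, by
          intro w hw
          rcases List.mem_cons.mp hw with rfl | hw
          · exact le_rfl
          · exact (hmax w hw).trans hle⟩

-- if threshold a is feasible, every smaller threshold is not, and 0 is not,
-- then a is one of the achievable window ranges
theorem attained (h : List Int) (c r a : Int) (hc : 1 ≤ c)
    (ha0 : 0 ≤ a)
    (hQa : r ≤ gcnt h c a 0)
    (hmin : ∀ x : Int, 0 ≤ x → x < a → ¬ r ≤ gcnt h c x 0)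
    (hQ0 : ¬ r ≤ gcnt h c 0 0) :
    a ∈ candsB c h := by
  by_cases hS : (candsB c h).filter (fun d => decide (0 < d) && decide (d ≤ a)) = []
  · exfalso
    have hiff : ∀ j : Int, 0 ≤ j → j + c ≤ (h.length : Int) →
        (dwin h c j ≤ a ↔ dwin h c j ≤ 0) := by
      intro j hj hjc
      have hmem : dwin h c j ∈ candsB c h := (mem_candsB c h hc _).2 ⟨j, hj, hjc, rfl⟩
      constructor
      · intro hle
        by_contra hgt
        have hin : dwin h c j ∈ (candsB c h).filter (fun d => decide (0 < d) && decide (d ≤ a)) :=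
          List.mem_filter.2 ⟨hmem, by
            simp only [Bool.and_eq_true, decide_eq_true_eq]
            exact ⟨by omega, hle⟩⟩
        rw [hS] at hin
        exact absurd hin (by simp)
      · intro h0; omega
    have heq := gcnt_congr h c a 0 hiff (((h.length : Int)).toNat) 0 le_rfl (by omega)
    rw [heq] at hQa
    exact hQ0 hQa
  · obtain ⟨v, hvS, hvmax⟩ := exists_max _ hS
    have hv' := List.mem_filter.1 hvS
    have hvc : v ∈ candsB c h := hv'.1
    have hv0 : 0 < v ∧ v ≤ a := by
      have := hv'.2
      simp only [Bool.and_eq_true, decide_eq_true_eq] at this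
      exact this
    by_cases hva : v = a
    · exact hva ▸ hvc
    · exfalso
      have hvlt : v < a := by omega
      have hiff : ∀ j : Int, 0 ≤ j → j + c ≤ (h.length : Int) →
          (dwin h c j ≤ v ↔ dwin h c j ≤ a) := by
        intro j hj hjc
        have hmem : dwin h c j ∈ candsB c h := (mem_candsB c h hc _).2 ⟨j, hj, hjc, rfl⟩
        constructor
        · intro hle; omega
        · intro hle
          by_cases hd0 : dwin h c j ≤ 0
          · omega
          · exact hvmax _ (List.mem_filter.2 ⟨hmem, by
              simp only [Bool.and_eq_true, decide_eq_true_eq]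
              exact ⟨by omega, hle⟩⟩)
      have heq := gcnt_congr h c v a hiff (((h.length : Int)).toNat) 0 le_rfl (by omega)
      exact hmin v (by omega) hvlt (by rw [heq]; exact hQa)

-- ===== VERDICT (by name: the statement is the Claim_ definition above) =====
theorem checkA_r_nonpos (m : Int) (p : Int × Int × Int × List Int) (hr : p.2.1 ≤ 0) :
    checkA m p = true := by
  obtain ⟨n, r, c, h⟩ := p
  simp only at hr
  have heq : checkLoopA h r c m (h.length + 1) 0 0 = (0, 0) := by
    simp only [checkLoopA, if_neg (by omega : ¬ ((0:Int) ≤ (h.length : Int) - c ∧ (0:Int) < r))]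
  simp only [checkA, heq]
  simp

theorem lbinsearch_spec : Claim_equal_lbinsearch := by
  unfold Claim_equal_lbinsearch
  intro p _hdom hpre
  unfold Spec_lbinsearch
  obtain ⟨n, r, c, h⟩ := p
  unfold Pre_lbinsearch at hpre
  obtain ⟨hne, hdisj⟩ := hpre
  have hlast : PySem.List.pyGet? h (-1) = some (h.getLast hne) := by
    rw [PySem.List.pyGet?_neg_one, List.getLast?_eq_getLast hne]
  have hhead : PySem.List.pyGet? h 0 = some (h.head hne) := by
    rw [PySem.List.pyGet?_zero, ← List.head?_eq_getElem?, List.head?_eq_head hne]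
  show lbinsearch (n, r, c, h) = lbinsearch_alt (n, r, c, h)
  unfold lbinsearch lbinsearch_alt
  simp only [hlast, hhead]
  have hdisj' : 1 ≤ c ∨ r ≤ 0 ∨ h.getLast hne - h.head hne ≤ 0 := by
    have e1 : h.getLastD 0 = h.getLast hne := by
      rw [List.getLastD_eq_getLast?, List.getLast?_eq_getLast hne]; rfl
    have e2 : h.headD 0 = h.head hne := by
      rw [List.headD_eq_head?, List.head?_eq_head hne]; rfl
    simp only at hdisj
    rcases hdisj with h1 | h1 | h1
    · exact Or.inl h1
    · exact Or.inr (Or.inl h1)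
    · rw [e1, e2] at h1; omega
  by_cases hH0 : h.getLast hne - h.head hne ≤ 0
  · rw [if_pos hH0, bsA_base _ _ _ (by omega)]
  · rw [if_neg hH0]
    by_cases hr : r ≤ 0
    · have hok : okB 0 r c h = true := by unfold okB; rw [if_pos hr]
      rw [if_pos hok]
      exact bsA_const_true (n, r, c, h) (fun x => checkA_r_nonpos x _ hr)
        (h.getLast hne - h.head hne).toNat 0 _ (by omega)
    · have hc : 1 ≤ c := by tauto
      have hiffQ : ∀ x : Int, checkA x (n, r, c, h) = true ↔
          (r ≤ 0 ∨ (h.length : Int) < c ∨ r ≤ gcnt h c x 0) :=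
        fun x => checkA_true_iff x (n, r, c, h) hc
      have okiff : ∀ x : Int, okB x r c h = true ↔
          (r ≤ 0 ∨ (h.length : Int) < c ∨ r ≤ gcnt h c x 0) :=
        fun x => okB_true_iff x r c h hc
      by_cases hcL : (h.length : Int) < c
      · have hok : okB 0 r c h = true := (okiff 0).2 (Or.inr (Or.inl hcL))
        rw [if_pos hok]
        exact bsA_const_true (n, r, c, h) (fun x => (hiffQ x).2 (Or.inr (Or.inl hcL)))
          (h.getLast hne - h.head hne).toNat 0 _ (by omega)
      · -- main case: 1 ≤ r, 1 ≤ c ≤ len, positive total range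
        have hQiff : ∀ x : Int, checkA x (n, r, c, h) = true ↔ r ≤ gcnt h c x 0 := by
          intro x
          rw [hiffQ x]
          constructor
          · rintro (h1 | h1 | h1) <;> omega
          · exact fun h1 => Or.inr (Or.inr h1)
        have okQiff : ∀ x : Int, okB x r c h = true ↔ r ≤ gcnt h c x 0 := by
          intro x
          rw [okiff x]
          constructor
          · rintro (h1 | h1 | h1) <;> omega
          · exact fun h1 => Or.inr (Or.inr h1)
        have hmono : ∀ x y : Int, x ≤ y → checkA x (n, r, c, h) = true →
            checkA y (n, r, c, h) = true := by
          intro x y hxy hx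
          rw [hQiff] at hx ⊢
          have := gcnt_mono h c x y hxy (((h.length : Int)).toNat) 0 le_rfl (by omega)
          omega
        obtain ⟨e1, e2, e3, e4⟩ := bsA_char (n, r, c, h) hmono
          (h.getLast hne - h.head hne).toNat 0 (h.getLast hne - h.head hne) (by omega) (by omega)
        have hpw : (candsB c h).Pairwise (· < ·) := by
          unfold candsB
          exact PySem.List.sorted_ofList_pairwise_lt _
        by_cases hQ0 : r ≤ gcnt h c 0 0
        · have hok : okB 0 r c h = true := (okQiff 0).2 hQ0
          rw [if_pos hok]
          by_contra hcon
          have ha0 : 0 < bsA (n, r, c, h) 0 (h.getLast hne - h.head hne) := by omega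
          exact e3 0 le_rfl ha0 ((hQiff 0).2 hQ0)
        · have hok : ¬ okB 0 r c h = true := fun hx => hQ0 ((okQiff 0).1 hx)
          rw [if_neg hok]
          have hane : 0 < bsA (n, r, c, h) 0 (h.getLast hne - h.head hne) := by
            rcases lt_or_eq_of_le e1 with h1 | h1
            · exact h1
            · exfalso
              have hlt : bsA (n, r, c, h) 0 (h.getLast hne - h.head hne) <
                  h.getLast hne - h.head hne := by omega
              exact hQ0 ((hQiff _).1 (h1 ▸ e4 hlt))
          rcases lt_or_eq_of_le e2 with haH | haH
          · -- the answer is strictly below the total range: it is an achievable window range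
            have hQa := (hQiff _).1 (e4 haH)
            have hminx : ∀ x : Int, 0 ≤ x → x < bsA (n, r, c, h) 0 (h.getLast hne - h.head hne) →
                ¬ r ≤ gcnt h c x 0 :=
              fun x hx1 hx2 hq => e3 x hx1 hx2 ((hQiff x).2 hq)
            have hmem := attained h c r _ hc (by omega) hQa hminx hQ0
            exact (scanB_first (h.getLast hne - h.head hne) r c h _ (candsB c h) hpw hmem
              ⟨hane, haH, (okQiff _).2 hQa⟩
              (fun w hw hwa hbad => hminx w (by omega) hwa ((okQiff w).1 hbad.2.2))).symm
          · -- nothing below the total range works: the scan falls through and returns it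
            rw [haH]
            exact (scanB_none (h.getLast hne - h.head hne) r c h (candsB c h)
              (fun v hv hbad => e3 v (by omega) (by omega) ((hQiff v).2 ((okQiff v).1 hbad.2.2)))).symm
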